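-- pv_equiv track=rewrite | github.com/99als/Python | Week 11 (Dictionaries and Sets)/Worksheet11-Q2.py | repeat_word_count
-- ===== SOURCE A (Python) =====
-- def repeat_word_count(text, n):
--     wordcount = {}
--     new_list = []
--     text = text.split()
--     for word in text:
--         if word in wordcount:
--             wordcount[word] += 1
--         else:
--             wordcount[word] = 1
--
--     for key, value in wordcount.items():
--         if value >= n:
--             new_list.append(key)
--     new_list = sorted(new_list)
--     return new_list
-- ===== SOURCE B (Python) =====
-- def repeat_word_count(text, n):
--     words = sorted(text.split())
--     result = []
--     if not words:
--         return result
--     cur = words[0]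
--     run = 1
--     for w in words[1:]:
--         if w == cur:
--             run += 1
--         else:
--             if run >= n:
--                 result.append(cur)
--             cur, run = w, 1
--     if run >= n:
--         result.append(cur)
--     return result
-- ===== Notes on version B (the rewrite author's own statement) =====
-- stated objective: alternative
-- what changed: Replaces the dict-counting pass plus final sort of the qualifying keys by sorting the word list first and emitting each word whose consecutive run is long enough during a single run-length scan, so no dictionary and no final sort are needed.
import Mathlib
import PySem

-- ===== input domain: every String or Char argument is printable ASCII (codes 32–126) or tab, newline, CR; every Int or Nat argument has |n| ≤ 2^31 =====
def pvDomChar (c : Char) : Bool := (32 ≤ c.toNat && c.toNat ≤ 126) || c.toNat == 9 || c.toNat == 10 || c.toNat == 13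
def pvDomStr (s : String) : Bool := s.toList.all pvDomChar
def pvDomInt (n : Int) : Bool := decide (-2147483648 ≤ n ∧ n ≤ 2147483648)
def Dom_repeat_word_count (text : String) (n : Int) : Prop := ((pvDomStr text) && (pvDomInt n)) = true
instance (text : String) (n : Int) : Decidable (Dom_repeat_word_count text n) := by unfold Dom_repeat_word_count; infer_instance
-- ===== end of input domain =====

-- B replaces A's dict-counting pass + final sort of the qualifying keys by one run-length scan over the sorted word list (alternative decomposition).


-- ===== PORT A =====
def repeat_word_count (text : String) (n : Int) : List String :=
  let ws := PySem.Str.split₀ text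
  let wordcount := ws.foldl (fun d w =>
      if d.contains w then d.insert w (d.getD w 0 + 1) else d.insert w 1)
    (PySem.Dict.empty : PySem.Dict String Int)
  let new_list := wordcount.items.foldl (fun acc kv =>
      if kv.2 ≥ n then acc ++ [kv.1] else acc) []
  PySem.List.sorted new_list (fun x => x) false

-- ===== PORT B =====
def rwcRun (n : Int) : List String → String → Int → List String
  | [], cur, run => if run ≥ n then [cur] else []
  | w :: rest, cur, run =>
    if w = cur then rwcRun n rest cur (run + 1)
    else (if run ≥ n then [cur] else []) ++ rwcRun n rest w 1

def repeat_word_count_alt (text : String) (n : Int) : List String :=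
  match PySem.List.sorted (PySem.Str.split₀ text) (fun x => x) false with
  | [] => []
  | w :: rest => rwcRun n rest w 1

-- ===== PRECONDITION & SPEC =====
def Spec_repeat_word_count (text : String) (n : Int) (out : List String) : Prop := out = repeat_word_count_alt text n
instance (text : String) (n : Int) (out : List String) : Decidable (Spec_repeat_word_count text n out) := by unfold Spec_repeat_word_count; infer_instance

-- ===== CLAIM (what is proved, stated in full; the proofs are below) =====
def Claim_equal_repeat_word_count : Prop := ∀ (text : String) (n : Int), Dom_repeat_word_count text n → Spec_repeat_word_count text n (repeat_word_count text n)

-- ===== LEMMAS AND PROOFS =====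

-- A's counting loop is exactly Counter(ws).
lemma rwc_fold_eq_counter (ws : List String) :
    ws.foldl (fun d w =>
      if d.contains w then d.insert w (d.getD w 0 + 1) else d.insert w 1)
      (PySem.Dict.empty : PySem.Dict String Int) = PySem.Dict.counter ws := by
  rw [← PySem.Dict.foldl_insert_getD_add_one_eq_counter]
  congr 1
  funext d w
  cases hb : d.contains w
  · rw [if_neg (by simp [hb]), PySem.Dict.getD_of_not_contains (h := hb)]
    norm_num
  · simp [hb]

-- A's key-collecting loop as filter ∘ map.
lemma rwc_items_fold (n : Int) (l : List (String × Int)) (acc : List String) :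
    l.foldl (fun acc kv => if kv.2 ≥ n then acc ++ [kv.1] else acc) acc
      = acc ++ (l.filter (fun kv => kv.2 ≥ n)).map (·.1) := by
  induction l generalizing acc with
  | nil => simp
  | cons kv t ih =>
    by_cases h : kv.2 ≥ n <;> simp [List.foldl_cons, h, ih, List.filter_cons]

-- The run-length scan on a sorted tail: strictly increasing output with exact membership.
lemma rwcRun_spec (n : Int) (rest : List String) (cur : String) (run : Int)
    (hs : (cur :: rest).Pairwise (· ≤ ·)) :
    (rwcRun n rest cur run).Pairwise (· < ·) ∧
    (∀ m, m ∈ rwcRun n rest cur run ↔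
      (m = cur ∧ n ≤ run + (rest.count cur : Int)) ∨
      (m ≠ cur ∧ m ∈ rest ∧ n ≤ (rest.count m : Int))) := by
  induction rest generalizing cur run with
  | nil =>
    constructor
    · by_cases h : run ≥ n <;> simp [rwcRun, h]
    · intro m
      by_cases h : run ≥ n <;> simp [rwcRun, h] <;> omega
  | cons w t ih =>
    rcases List.pairwise_cons.mp hs with ⟨hcur, ht⟩
    by_cases hw : w = cur
    · subst hw
      have ih' := ih w (run + 1) ht
      refine ⟨by simpa [rwcRun] using ih'.1, ?_⟩
      intro m
      rw [show rwcRun n (w :: t) w run = rwcRun n t w (run + 1) by simp [rwcRun]]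
      rw [ih'.2 m]
      constructor
      · rintro (⟨rfl, h⟩ | ⟨hne, hm, h⟩)
        · exact Or.inl ⟨rfl, by simp [List.count_cons]; push_cast; push_cast at h; omega⟩
        · exact Or.inr ⟨hne, List.mem_cons_of_mem _ hm, by
            simp [List.count_cons, Ne.symm hne]; exact_mod_cast h⟩
      · rintro (⟨rfl, h⟩ | ⟨hne, hm, h⟩)
        · exact Or.inl ⟨rfl, by simp [List.count_cons] at h; push_cast at h ⊢; omega⟩
        · refine Or.inr ⟨hne, ?_, ?_⟩
          · rcases List.mem_cons.mp hm with rfl | hm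
            · exact absurd rfl hne
            · exact hm
          · simpa [List.count_cons, Ne.symm hne] using h
    · -- w ≠ cur : cur < w ≤ every later element, so cur never reoccurs
      have hcw : cur < w := lt_of_le_of_ne (hcur w List.mem_cons_self) (Ne.symm hw)
      rcases List.pairwise_cons.mp ht with ⟨hwt, _⟩
      have hcnt : cur ∉ t := fun hc => absurd hcw (not_lt.mpr (hwt cur hc))
      have hcm : cur ∉ w :: t := by
        intro h
        rcases List.mem_cons.mp h with h | h
        · exact hw h.symm
        · exact hcnt h
      have ih' := ih w 1 ht
      have hwge : ∀ m ∈ rwcRun n t w 1, cur < m := by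
        intro m hm
        rcases (ih'.2 m).mp hm with ⟨rfl, _⟩ | ⟨_, hm', _⟩
        · exact hcw
        · exact lt_of_lt_of_le hcw (hwt m hm')
      have hrw : rwcRun n (w :: t) cur run
          = (if run ≥ n then [cur] else []) ++ rwcRun n t w 1 := by
        simp [rwcRun, hw]
      constructor
      · rw [hrw]
        rw [List.pairwise_append]
        refine ⟨?_, ih'.1, ?_⟩
        · by_cases h : run ≥ n <;> simp [h]
        · intro a ha b hb
          by_cases h : run ≥ n
          · simp [h] at ha; subst ha; exact hwge b hb
          · simp [h] at ha
      · intro m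
        rw [hrw]
        simp only [List.mem_append]
        constructor
        · rintro (h1 | h2)
          · by_cases h : run ≥ n
            · simp [h] at h1
              subst h1
              refine Or.inl ⟨rfl, ?_⟩
              rw [List.count_eq_zero.mpr hcm]
              push_cast
              omega
            · simp [h] at h1
          · rcases (ih'.2 m).mp h2 with ⟨rfl, hc⟩ | ⟨hne, hm, hc⟩
            · refine Or.inr ⟨fun he => hw he, List.mem_cons_self, ?_⟩
              simp [List.count_cons]
              push_cast at hc ⊢
              omega
            · refine Or.inr ⟨(lt_of_lt_of_le hcw (hwt m hm)).ne', List.mem_cons_of_mem _ hm, ?_⟩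
              simpa [List.count_cons, Ne.symm hne] using hc
        · rintro (⟨rfl, hc⟩ | ⟨hne, hm, hc⟩)
          · rw [List.count_eq_zero.mpr hcm] at hc
            have : run ≥ n := by push_cast at hc; omega
            exact Or.inl (by simp [this])
          · refine Or.inr ((ih'.2 m).mpr ?_)
            by_cases hmw : m = w
            · subst hmw
              refine Or.inl ⟨rfl, ?_⟩
              simp [List.count_cons] at hc
              push_cast at hc ⊢
              omega
            · refine Or.inr ⟨hmw, ?_, ?_⟩
              · rcases List.mem_cons.mp hm with h | h
                · exact absurd h hmw
                · exact h
              · simpa [List.count_cons, Ne.symm hmw] using hc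

-- The core equality, stated over the word list.
lemma rwc_main (ws : List String) (n : Int) :
    PySem.List.sorted
      ((ws.foldl (fun d w =>
          if d.contains w then d.insert w (d.getD w 0 + 1) else d.insert w 1)
        (PySem.Dict.empty : PySem.Dict String Int)).items.foldl
        (fun acc kv => if kv.2 ≥ n then acc ++ [kv.1] else acc) [])
      (fun x => x) false
    = match PySem.List.sorted ws (fun x => x) false with
      | [] => []
      | w :: rest => rwcRun n rest w 1 := by
  rw [rwc_fold_eq_counter, rwc_items_fold, PySem.Dict.items_counter]
  have hL : (((PySem.Set.ofList ws).map (fun k => (k, (ws.count k : Int)))).filter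
        (fun kv => kv.2 ≥ n)).map (·.1)
      = (PySem.Set.ofList ws).filter (fun k => (ws.count k : Int) ≥ n) := by
    rw [List.filter_map, List.map_map]
    simp [Function.comp_def]
  rw [List.nil_append, hL]
  cases h : PySem.List.sorted ws (fun x => x) false with
  | nil =>
    have : ws = [] := (PySem.List.sorted_eq_nil_iff ws (fun x => x) false).mp h
    subst this
    simp [PySem.Set.ofList, PySem.List.sorted]
  | cons w rest =>
    have hperm : (w :: rest).Perm ws := h ▸ PySem.List.sorted_perm ws (fun x => x) false
    have hpair : (w :: rest).Pairwise (· ≤ ·) := by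
      have := PySem.List.sorted_pairwise ws (fun x => x)
      rw [h] at this
      exact this
    have spec := rwcRun_spec n rest w 1 hpair
    apply PySem.List.sorted_eq_of_perm_of_pairwise_lt
    · -- (rwcRun n rest w 1).Perm (filter …)
      rw [List.perm_ext_iff_of_nodup (spec.1.imp ne_of_lt)
        ((PySem.Set.nodup_ofList ws).filter _)]
      intro m
      rw [spec.2 m, List.mem_filter]
      have hmem : m ∈ PySem.Set.ofList ws ↔ m = w ∨ m ∈ rest := by
        rw [PySem.Set.mem_ofList, ← hperm.mem_iff, List.mem_cons]
      have hcnt : ws.count m = (w :: rest).count m := (hperm.count_eq m).symm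
      constructor
      · rintro (⟨rfl, hc⟩ | ⟨hne, hm, hc⟩)
        · refine ⟨hmem.mpr (Or.inl rfl), ?_⟩
          simp [hcnt, List.count_cons]
          push_cast at hc ⊢
          omega
        · refine ⟨hmem.mpr (Or.inr hm), ?_⟩
          simp only [decide_eq_true_eq, ge_iff_le]
          rw [hcnt]
          simpa [List.count_cons, Ne.symm hne] using hc
      · rintro ⟨hm, hc⟩
        simp only [decide_eq_true_eq, ge_iff_le] at hc
        rw [hcnt] at hc
        by_cases hmw : m = w
        · subst hmw
          refine Or.inl ⟨rfl, ?_⟩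
          simp [List.count_cons] at hc
          push_cast at hc ⊢
          omega
        · rcases hmem.mp hm with h | h
          · exact absurd h hmw
          · refine Or.inr ⟨hmw, h, ?_⟩
            simpa [List.count_cons, Ne.symm hmw] using hc
    · exact spec.1

-- ===== VERDICT (by name: the statement is the Claim_ definition above) =====
theorem repeat_word_count_spec : Claim_equal_repeat_word_count := by
  intro text n _
  unfold Spec_repeat_word_count repeat_word_count repeat_word_count_alt
  exact rwc_main (PySem.Str.split₀ text) n
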